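-- pv_equiv track=rewrite | github.com/YundaeLeeSong/ydjs-coding-javalin | _ap_quiz_02.py | userCompare
-- ===== SOURCE A (Python) =====
-- def userCompare(aName: str, aId: int, bName: str, bId: int) -> int:
--     """
--     Description:
--         We have data for two users, A and B, each with a string
--         `name` and an integer `id`.
--         The goal is to order the users for sorting. Return:
--           - -1 if A comes before B
--           -  1 if A comes after B
--           -  0 if they are the same.
--         Order first by name (lexicographically), and if the names
--         are equal, order by id.
--
--     Examples:
--         userCompare("bb", 1, "zz", 2) -> -1
--         userCompare("bb", 1, "aa", 2) -> 1
--         userCompare("bb", 1, "bb", 1) -> 0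
--         userCompare("bb", 5, "bb", 1) -> 1
--         userCompare("bb", 5, "bb", 10) -> -1
--         userCompare("adam", 1, "bob", 2) -> -1
--         userCompare("bob", 1, "bob", 2) -> -1
--         userCompare("bzb", 1, "bob", 2) -> 1
--
--     Instructions to run the tests via the CLI:
--         1. Open your terminal or command prompt.
--         2. Run the tests by executing: `python async-ap/q19.py`
--
--     Args:
--         aName (str): Name of user A.
--         aId   (int): ID of user A.
--         bName (str): Name of user B.
--         bId   (int): ID of user B.
--
--     Returns:
--         int: -1 if A < B, 1 if A > B, 0 if they are equal.
--     """
--     ### [Your Implementation Here]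
--     if aName == bName:
--         if aId < bId:
--             return -1
--         if bId < aId:
--             return 1
--         if aId == bId:
--             return 0
--     i = 0
--     while i < len(aName) and i < len(bName):
--         if ord(aName[i]) < ord(bName[i]):
--             return -1
--         if ord(aName[i]) > ord(bName[i]):
--             return 1
--         i += 1
--     # If all compared characters match, compare by length
--     if len(aName) < len(bName):
--         return -1
--     if len(aName) > len(bName):
--         return 1
--     return 0
-- ===== SOURCE B (Python) =====
-- def userCompare(aName: str, aId: int, bName: str, bId: int) -> int:
--     ka = (aName, aId)
--     kb = (bName, bId)
--     return (ka > kb) - (ka < kb)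
-- ===== Notes on version B (the rewrite author's own statement) =====
-- stated objective: simpler
-- what changed: Replaced the manual ord-by-ord character scan with length and id fallback branches by one delegated comparison of the tuples (name, id), taking the three-way sign of Python's native lexicographic tuple/string comparison.
import Mathlib
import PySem

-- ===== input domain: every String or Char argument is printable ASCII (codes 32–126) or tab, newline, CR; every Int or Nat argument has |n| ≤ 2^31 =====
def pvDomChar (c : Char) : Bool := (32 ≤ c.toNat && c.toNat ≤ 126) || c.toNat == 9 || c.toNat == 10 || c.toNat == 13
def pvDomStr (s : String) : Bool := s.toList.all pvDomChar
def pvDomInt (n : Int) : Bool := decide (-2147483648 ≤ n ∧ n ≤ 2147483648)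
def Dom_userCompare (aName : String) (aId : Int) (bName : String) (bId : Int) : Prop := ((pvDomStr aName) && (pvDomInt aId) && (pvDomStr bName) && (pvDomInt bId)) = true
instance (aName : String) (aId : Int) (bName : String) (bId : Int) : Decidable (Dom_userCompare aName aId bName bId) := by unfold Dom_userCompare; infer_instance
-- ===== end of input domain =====

-- B replaces A's manual ord-by-ord scan with length/id fallback branches by one delegated
-- lexicographic comparison of the keys (name, id), returning its three-way sign (objective: simpler).


-- ===== PORT A =====
-- the while loop over index i, as structural recursion over the two character lists;
-- the catch-all branch is the length comparison after the loop
def pvCmpLoop : List Char → List Char → Int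
  | x :: xs, y :: ys =>
    if x.toNat < y.toNat then -1
    else if y.toNat < x.toNat then 1
    else pvCmpLoop xs ys
  | xs, ys =>
    if xs.length < ys.length then -1
    else if ys.length < xs.length then 1
    else 0

def userCompare (aName : String) (aId : Int) (bName : String) (bId : Int) : Int :=
  if aName == bName then
    if aId < bId then -1
    else if bId < aId then 1
    else 0
  else pvCmpLoop aName.toList bName.toList

-- ===== PORT B =====
-- Python's lexicographic '<' on the pair (name, id); strings compare by code point,
-- which is exactly Lean's String '<'
def pvKeyLt (x y : String × Int) : Bool := x.1 < y.1 || (x.1 == y.1 && x.2 < y.2)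

def userCompare_alt (aName : String) (aId : Int) (bName : String) (bId : Int) : Int :=
  let ka := (aName, aId)
  let kb := (bName, bId)
  (if pvKeyLt kb ka then 1 else 0) - (if pvKeyLt ka kb then 1 else 0)

-- ===== PRECONDITION & SPEC =====
def Spec_userCompare (aName : String) (aId : Int) (bName : String) (bId : Int) (out : Int) : Prop := out = userCompare_alt aName aId bName bId
instance (aName : String) (aId : Int) (bName : String) (bId : Int) (out : Int) : Decidable (Spec_userCompare aName aId bName bId out) := by unfold Spec_userCompare; infer_instance

-- ===== CLAIM (what is proved, stated in full; the proofs are below) =====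
def Claim_equal_userCompare : Prop := ∀ (aName : String) (aId : Int) (bName : String) (bId : Int), Dom_userCompare aName aId bName bId → Spec_userCompare aName aId bName bId (userCompare aName aId bName bId)

-- ===== LEMMAS AND PROOFS =====

-- A's character scan computes the three-way sign of the list lexicographic order
theorem pvCmpLoop_eq (xs ys : List Char) :
    pvCmpLoop xs ys = (if ys < xs then (1:Int) else 0) - (if xs < ys then 1 else 0) := by
  induction xs generalizing ys with
  | nil =>
    cases ys with
    | nil => simp [pvCmpLoop]
    | cons y ys => simp [pvCmpLoop, List.nil_lt_cons]
  | cons x xs ih =>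
    cases ys with
    | nil => simp [pvCmpLoop]
    | cons y ys =>
      have hx : (x < y) ↔ x.toNat < y.toNat := Iff.rfl
      have hy : (y < x) ↔ y.toNat < x.toNat := Iff.rfl
      by_cases h1 : x.toNat < y.toNat
      · have hlt : (x :: xs : List Char) < y :: ys :=
          List.cons_lt_cons_iff.mpr (Or.inl (hx.mpr h1))
        have hngt : ¬ ((y :: ys : List Char) < x :: xs) := by
          rw [List.cons_lt_cons_iff]
          rintro (h | ⟨h, -⟩)
          · exact absurd (hy.mp h) (by omega)
          · exact absurd h1 (by simp [h])
        simp [pvCmpLoop, h1, hlt, hngt]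
      · by_cases h2 : y.toNat < x.toNat
        · have hgt : (y :: ys : List Char) < x :: xs :=
            List.cons_lt_cons_iff.mpr (Or.inl (hy.mpr h2))
          have hnlt : ¬ ((x :: xs : List Char) < y :: ys) := by
            rw [List.cons_lt_cons_iff]
            rintro (h | ⟨h, -⟩)
            · exact absurd (hx.mp h) (by omega)
            · exact absurd h2 (by simp [h])
          simp [pvCmpLoop, h1, h2, hgt, hnlt]
        · have hxy : x = y := Char.ext (UInt32.toNat_inj.mp (by simp only [Char.toNat] at h1 h2; omega))
          subst hxy
          have hirr : ¬ (x < x) := fun h => Nat.lt_irrefl _ (hx.mp h)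
          simp [pvCmpLoop, ih]

-- ===== VERDICT (by name: the statement is the Claim_ definition above) =====
theorem userCompare_spec : Claim_equal_userCompare := by
  intro aName aId bName bId _
  unfold Spec_userCompare userCompare userCompare_alt pvKeyLt
  by_cases h : aName = bName
  · subst h
    simp only [beq_self_eq_true, if_true]
    simp
    split_ifs <;> omega
  · have hne : (aName == bName) = false := beq_eq_false_iff_ne.mpr h
    have hne' : (bName == aName) = false := beq_eq_false_iff_ne.mpr (Ne.symm h)
    simp only [hne, hne', Bool.false_and, Bool.or_false]
    rw [pvCmpLoop_eq]
    have la : aName < bName ↔ aName.toList < bName.toList := String.lt_iff_toList_lt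
    have lb : bName < aName ↔ bName.toList < aName.toList := String.lt_iff_toList_lt
    by_cases h1 : aName < bName <;> by_cases h2 : bName < aName <;>
      simp [*]
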